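-- pv_equiv track=rewrite | github.com/marcovivar/8-queens-problem-heuristic | funcHeuristicaP8Reinas.py | filaBloqueada
-- ===== SOURCE A (Python) =====
-- import copy
--
-- def filaBloqueada(t,f,candidata):    #este es el ultimo recurso para posicionar una reina, verifica que no deja ninguna fila inferior sin opciones
--     auxt=auxt=copy.deepcopy(t)  #se utiliza este metodo para no modificar la matriz original, ya que si la asignamos, lo que se esta haciendo es referenciar la original
--     conta=0
--     for i in range(N):
--         if(i==candidata):
--             #se valida que no sea una casilla del borde inferior
--             if(f!=N-1):
--                 for j in range(f+1,N):  #bloque de la vertical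
--                     auxt[j][i]=1
--             #se valida que no sea una casilla del borde derecho
--             if(i!=N-1):
--                 k=f+1
--                 for j in range(i+1,N):  #bloqueo diagonal derecha
--                     auxt[k][j]=1
--                     k=k+1
--                     if(k==N):
--                         break
--             #se valida que no sea una casilla del borde izquierdo
--             if(i!=0):
--                 k=f+1
--                 for j in range(i-1,-1,-1):  #bloqueo diagonal izquierda
--                     auxt[k][j]=1
--                     k=k+1
--                     if(k==N):
--                         break
--             break   #una vez encontrada la reina de la fila se sale del for
--     #se procede a verificar que la asilla candidata no deje filas inferiores bloqueadas
--     for i in range(f+1,N):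
--         conta=0
--         for j in range(N):
--             if(auxt[i][j]==1):
--                 conta=conta+1
--                 if(conta==8):   #al encontrar 8 unos significa que esta toda la fila bloqueada y se descarta esa casilla candidata
--                     return False
--     return True #al no encontrar filas bloquedas retorna true y esa casilla es la indicada para colocar la reina
--
-- N=8 #numero de reinas
-- ===== SOURCE B (Python) =====
-- N = 8  # numero de reinas
--
-- def filaBloqueada(t, f, candidata):
--     # One pass: a lower row i is fully blocked iff every column j either already
--     # holds a 1 or is attacked by the candidate (vertical or either diagonal).
--     enTablero = 0 <= candidata < N
--     for i in range(f + 1, N):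
--         d = i - f
--         if all(t[i][j] == 1
--                or (enTablero and (j == candidata
--                                   or j == candidata + d
--                                   or j == candidata - d))
--                for j in range(N)):
--             return False
--     return True
-- ===== Notes on version B (the rewrite author's own statement) =====
-- stated objective: simpler
-- what changed: B drops A's deepcopy-and-grid-marking: instead of writing 1s into a copied board and then re-counting each row, it judges each lower row in one analytic pass (a column is blocked iff it already holds a 1 or is attacked vertically/diagonally by the candidate).
import Mathlib
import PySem

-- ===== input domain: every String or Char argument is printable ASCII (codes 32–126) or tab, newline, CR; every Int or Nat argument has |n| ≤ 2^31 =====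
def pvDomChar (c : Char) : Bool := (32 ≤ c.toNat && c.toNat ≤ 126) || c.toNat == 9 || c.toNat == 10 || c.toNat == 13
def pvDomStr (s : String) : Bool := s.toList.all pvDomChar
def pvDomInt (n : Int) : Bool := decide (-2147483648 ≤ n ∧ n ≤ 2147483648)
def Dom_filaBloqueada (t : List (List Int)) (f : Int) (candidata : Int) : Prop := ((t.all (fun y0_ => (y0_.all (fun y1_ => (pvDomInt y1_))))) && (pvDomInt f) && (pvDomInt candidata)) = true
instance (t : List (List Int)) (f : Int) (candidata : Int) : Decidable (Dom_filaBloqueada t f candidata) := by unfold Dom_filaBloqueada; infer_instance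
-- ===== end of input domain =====

-- B drops A's deepcopy-and-mark pass: each lower row is judged in one analytic pass
-- (a column is blocked iff it holds a 1 or is attacked by the candidate); objective: simpler.

-- ===== PORT A =====
-- t[a][b] (read with defaults; Pre_ keeps every index used nonnegative and in range, where this is exact)
def pvGetCell (m : List (List Int)) (a b : Int) : Int :=
  PySem.List.pyGetD (PySem.List.pyGetD m a []) b 0

-- auxt[a][b] = 1 (Python list assignment; exact for the in-range indices Pre_ guarantees)
def pvSetCell (m : List (List Int)) (a b : Int) : List (List Int) :=
  PySem.List.pySetD m a (PySem.List.pySetD (PySem.List.pyGetD m a []) b 1)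

-- for j in range(f+1,N): auxt[j][i]=1
def pvVert (auxt : List (List Int)) (i : Int) (rows : List Int) : List (List Int) :=
  rows.foldl (fun m j => pvSetCell m j i) auxt

-- k=f+1; for j in cols: auxt[k][j]=1; k+=1; if k==N: break
def pvDiag (auxt : List (List Int)) (k : Int) (cols : List Int) : List (List Int) :=
  match cols with
  | [] => auxt
  | j :: rest =>
    let m := pvSetCell auxt k j
    if k + 1 = 8 then m else pvDiag m (k + 1) rest

-- the body executed when the marking loop finds i == candidata
def pvMark (auxt : List (List Int)) (f i : Int) : List (List Int) :=
  let m1 := if f = 7 then auxt else pvVert auxt i (PySem.List.pyRange (f + 1) 8 1)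
  let m2 := if i = 7 then m1 else pvDiag m1 (f + 1) (PySem.List.pyRange (i + 1) 8 1)
  if i = 0 then m2 else pvDiag m2 (f + 1) (PySem.List.pyRange (i - 1) (-1) (-1))

-- for i in range(N): if i==candidata: <mark>; break
def pvFind (auxt : List (List Int)) (f c : Int) (is_ : List Int) : List (List Int) :=
  match is_ with
  | [] => auxt
  | i :: rest => if i = c then pvMark auxt f i else pvFind auxt f c rest

-- inner counting loop of the scan, early 'return False' when conta hits 8
def pvRowScan (r : List Int) (cols : List Int) (conta : Int) : Bool :=
  match cols with
  | [] => false
  | j :: rest =>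
    if PySem.List.pyGetD r j 0 = 1 then
      if conta + 1 = 8 then true else pvRowScan r rest (conta + 1)
    else pvRowScan r rest conta

-- for i in range(f+1,N): conta=0; <inner loop>
def pvScan (auxt : List (List Int)) (is_ : List Int) : Bool :=
  match is_ with
  | [] => true
  | i :: rest =>
    if pvRowScan (PySem.List.pyGetD auxt i []) (PySem.List.pyRange 0 8 1) 0 then false
    else pvScan auxt rest

def filaBloqueada (t : List (List Int)) (f : Int) (candidata : Int) : Bool :=
  let auxt := pvFind t f candidata (PySem.List.pyRange 0 8 1)
  pvScan auxt (PySem.List.pyRange (f + 1) 8 1)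

-- ===== PORT B =====
-- all(t[i][j]==1 or (enTablero and (j==c or j==c+d or j==c-d)) for j in range(N))
def pvAltRow (t : List (List Int)) (f c i : Int) (enTablero : Bool) : Bool :=
  (PySem.List.pyRange 0 8 1).all (fun j =>
    (pvGetCell t i j == 1) ||
      (enTablero && ((j == c) || (j == c + (i - f)) || (j == c - (i - f)))))

-- for i in range(f+1,N): if all(...): return False
def pvAltLoop (t : List (List Int)) (f c : Int) (enTablero : Bool) (is_ : List Int) : Bool :=
  match is_ with
  | [] => true
  | i :: rest => if pvAltRow t f c i enTablero then false else pvAltLoop t f c enTablero rest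

def filaBloqueada_alt (t : List (List Int)) (f : Int) (candidata : Int) : Bool :=
  let enTablero := decide (0 ≤ candidata ∧ candidata < 8)
  pvAltLoop t f candidata enTablero (PySem.List.pyRange (f + 1) 8 1)

-- ===== PRECONDITION & SPEC =====
-- Pre_ is the natural domain of the 8-queens board: a board with at least 8 rows of at least 8
-- columns and a row index 0 ≤ f < 8 (outside it A index-errors or wraps negative indices), minus
-- f = 7 with an on-board candidata, where A raises IndexError (its diagonal loops write to row 8
-- before checking the break); plus the region f ≥ 7 with an off-board candidata, where A touches
-- no cell at all and returns True for any t.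
def Pre_filaBloqueada (t : List (List Int)) (f : Int) (candidata : Int) : Prop :=
  (8 ≤ t.length ∧ (∀ r ∈ t, 8 ≤ r.length) ∧ 0 ≤ f ∧ f < 8 ∧
    ¬(f = 7 ∧ 0 ≤ candidata ∧ candidata < 8)) ∨
  (7 ≤ f ∧ ¬(0 ≤ candidata ∧ candidata < 8))
instance (t : List (List Int)) (f : Int) (candidata : Int) : Decidable (Pre_filaBloqueada t f candidata) := by
  unfold Pre_filaBloqueada; infer_instance

def pvWitness_filaBloqueada : List (List Int) × Int × Int :=
  ([[0,0,0,0,0,0,0,0],[0,0,0,0,0,0,0,0],[0,0,0,0,0,0,0,0],[0,0,0,0,0,0,0,0],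
    [0,0,0,0,0,0,0,0],[0,0,0,0,0,0,0,0],[0,0,0,0,0,0,0,0],[0,0,0,0,0,0,0,0]], 0, 3)

def Spec_filaBloqueada (t : List (List Int)) (f : Int) (candidata : Int) (out : Bool) : Prop :=
  out = filaBloqueada_alt t f candidata
instance (t : List (List Int)) (f : Int) (candidata : Int) (out : Bool) : Decidable (Spec_filaBloqueada t f candidata out) := by
  unfold Spec_filaBloqueada; infer_instance

-- ===== CLAIM (what is proved, stated in full; the proofs are below) =====
def Claim_equal_filaBloqueada : Prop := ∀ (t : List (List Int)) (f : Int) (candidata : Int), Dom_filaBloqueada t f candidata → Pre_filaBloqueada t f candidata → Spec_filaBloqueada t f candidata (filaBloqueada t f candidata)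

-- ===== LEMMAS AND PROOFS =====

-- a well-formed 8×8 board
def pvWF (m : List (List Int)) : Prop := 8 ≤ m.length ∧ ∀ r ∈ m, 8 ≤ r.length

theorem pvRow_mem (m : List (List Int)) (a : Int) (hlen : 8 ≤ m.length)
    (ha : 0 ≤ a) (ha8 : a < 8) : PySem.List.pyGetD m a [] ∈ m := by
  rw [PySem.List.pyGetD_eq_getElem _ _ ha (by omega)]
  exact List.getElem_mem _

theorem pvWF_set (m : List (List Int)) (a b : Int) (hm : pvWF m)
    (ha : 0 ≤ a) (ha8 : a < 8) (hb : 0 ≤ b) : pvWF (pvSetCell m a b) := by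
  obtain ⟨hlen, hrow⟩ := hm
  unfold pvSetCell
  rw [PySem.List.pySetD_of_nonneg _ _ ha, PySem.List.pySetD_of_nonneg _ _ hb]
  refine ⟨by simpa using hlen, ?_⟩
  intro r hr
  rcases List.mem_or_eq_of_mem_set hr with h | h
  · exact hrow r h
  · subst h
    simpa using hrow _ (pvRow_mem m a hlen ha ha8)

theorem pvGetCell_getD (m : List (List Int)) (i j : Nat) :
    pvGetCell m (i : Int) (j : Int) = (m.getD i []).getD j 0 := by
  simp [pvGetCell]

theorem pvSetCell_eq (m : List (List Int)) (a b : Nat) :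
    pvSetCell m (a : Int) (b : Int) = m.set a ((m.getD a []).set b 1) := by
  simp [pvSetCell]

theorem pvGetD_set (l : List (List Int)) (n i : Nat) (v d : List Int) (hn : n < l.length) :
    (l.set n v).getD i d = if n = i then v else l.getD i d := by
  by_cases h : n = i
  · subst h
    rw [List.getD_eq_getElem?_getD, List.getElem?_set_self hn, Option.getD_some, if_pos rfl]
  · rw [List.getD_eq_getElem?_getD, List.getElem?_set_ne h, ← List.getD_eq_getElem?_getD, if_neg h]

theorem pvGetD_set' (l : List Int) (n i : Nat) (v d : Int) (hn : n < l.length) :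
    (l.set n v).getD i d = if n = i then v else l.getD i d := by
  by_cases h : n = i
  · subst h
    rw [List.getD_eq_getElem?_getD, List.getElem?_set_self hn, Option.getD_some, if_pos rfl]
  · rw [List.getD_eq_getElem?_getD, List.getElem?_set_ne h, ← List.getD_eq_getElem?_getD, if_neg h]

theorem pvGetCell_set (m : List (List Int)) (a b i j : Int) (hm : pvWF m)
    (ha : 0 ≤ a) (ha8 : a < 8) (hb : 0 ≤ b) (hb8 : b < 8)
    (hi : 0 ≤ i) (hi8 : i < 8) (hj : 0 ≤ j) (hj8 : j < 8) :
    pvGetCell (pvSetCell m a b) i j = if i = a ∧ j = b then 1 else pvGetCell m i j := by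
  obtain ⟨na, rfl⟩ := Int.eq_ofNat_of_zero_le ha
  obtain ⟨nb, rfl⟩ := Int.eq_ofNat_of_zero_le hb
  obtain ⟨ni, rfl⟩ := Int.eq_ofNat_of_zero_le hi
  obtain ⟨nj, rfl⟩ := Int.eq_ofNat_of_zero_le hj
  obtain ⟨hlen, hrow⟩ := hm
  have hrlen : 8 ≤ (m.getD na []).length := by
    rw [List.getD_eq_getElem m [] (by omega)]
    exact hrow _ (List.getElem_mem _)
  rw [pvSetCell_eq, pvGetCell_getD, pvGetCell_getD]
  rw [pvGetD_set m na ni _ [] (by omega)]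
  by_cases hia : na = ni
  · rw [if_pos hia]
    subst hia
    rw [pvGetD_set' _ nb nj 1 0 (by omega)]
    by_cases hjb : nb = nj
    · rw [if_pos hjb]
      subst hjb
      rw [if_pos ⟨rfl, rfl⟩]
    · rw [if_neg hjb, if_neg (by rintro ⟨-, h⟩; exact hjb (by exact_mod_cast h.symm))]
  · rw [if_neg hia, if_neg (by rintro ⟨h, -⟩; exact hia (by exact_mod_cast h.symm))]

theorem pvVert_get (rows : List Int) (m : List (List Int)) (c i j : Int) (hm : pvWF m)
    (hrows : ∀ x ∈ rows, 0 ≤ x ∧ x < 8) (hc : 0 ≤ c) (hc8 : c < 8)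
    (hi : 0 ≤ i) (hi8 : i < 8) (hj : 0 ≤ j) (hj8 : j < 8) :
    pvWF (pvVert m c rows) ∧
      (pvGetCell (pvVert m c rows) i j = if i ∈ rows ∧ j = c then 1 else pvGetCell m i j) := by
  induction rows generalizing m with
  | nil => simpa [pvVert] using hm
  | cons x rest ih =>
    have hx := hrows x (by simp)
    have hm' := pvWF_set m x c hm hx.1 hx.2 hc
    have step : pvVert m c (x :: rest) = pvVert (pvSetCell m x c) c rest := by
      simp [pvVert]
    rw [step]
    obtain ⟨hwf, hget⟩ := ih (pvSetCell m x c) hm' (fun y hy => hrows y (by simp [hy]))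
    refine ⟨hwf, ?_⟩
    rw [hget, pvGetCell_set m x c i j hm hx.1 hx.2 hc hc8 hi hi8 hj hj8]
    by_cases h1 : i ∈ rest ∧ j = c
    · simp [h1]
    · rw [if_neg h1]
      by_cases h2 : i = x ∧ j = c
      · simp [h2]
      · have hniff : ¬ (i ∈ x :: rest ∧ j = c) := by
          rintro ⟨hmem, hjc⟩
          rcases List.mem_cons.mp hmem with h | h
          · exact h2 ⟨h, hjc⟩
          · exact h1 ⟨h, hjc⟩
        rw [if_neg h2, if_neg hniff]

theorem pvDiag_get (cols : List Int) (m : List (List Int)) (k i j : Int) (hm : pvWF m)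
    (hcols : ∀ x ∈ cols, 0 ≤ x ∧ x < 8) (hk : 0 ≤ k) (hk8 : k ≤ 7)
    (hi : 0 ≤ i) (hi8 : i < 8) (hj : 0 ≤ j) (hj8 : j < 8) :
    pvWF (pvDiag m k cols) ∧
      ((∃ s : Nat, s < cols.length ∧ k + s ≤ 7 ∧ i = k + s ∧ cols[s]? = some j) →
        pvGetCell (pvDiag m k cols) i j = 1) ∧
      (¬ (∃ s : Nat, s < cols.length ∧ k + s ≤ 7 ∧ i = k + s ∧ cols[s]? = some j) →
        pvGetCell (pvDiag m k cols) i j = pvGetCell m i j) := by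
  induction cols generalizing m k with
  | nil => simpa [pvDiag] using hm
  | cons x rest ih =>
    have hx := hcols x (by simp)
    have hm' := pvWF_set m k x hm hk (by omega) hx.1
    have hset := pvGetCell_set m k x i j hm hk (by omega) hx.1 hx.2 hi hi8 hj hj8
    by_cases hbrk : k + 1 = 8
    · have hd : pvDiag m k (x :: rest) = pvSetCell m k x := by simp [pvDiag, hbrk]
      rw [hd]
      refine ⟨hm', ?_, ?_⟩
      · rintro ⟨s, hs1, hs2, hs3, hs4⟩
        have hs0 : s = 0 := by omega
        subst hs0
        simp at hs4
        rw [hset, if_pos ⟨by omega, by omega⟩]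
      · intro hns
        rw [hset, if_neg ?_]
        rintro ⟨h1, h2⟩
        exact hns ⟨0, by simp, by omega, by omega, by simp [h2]⟩
    · have hd : pvDiag m k (x :: rest) = pvDiag (pvSetCell m k x) (k + 1) rest := by
        simp [pvDiag, hbrk]
      rw [hd]
      obtain ⟨hwf, hyes, hno⟩ := ih (pvSetCell m k x) (k + 1) hm'
        (fun y hy => hcols y (by simp [hy])) (by omega) (by omega)
      refine ⟨hwf, ?_, ?_⟩
      · rintro ⟨s, hs1, hs2, hs3, hs4⟩
        cases s with
        | zero =>
          simp at hs4
          rw [hno ?_, hset, if_pos ⟨by omega, by omega⟩]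
          rintro ⟨s', hs1', hs2', hs3', hs4'⟩
          omega
        | succ s' =>
          refine hyes ⟨s', by simpa using hs1, by omega, by omega, by simpa using hs4⟩
      · intro hns
        rw [hno ?_, hset, if_neg ?_]
        · rintro ⟨h1, h2⟩
          exact hns ⟨0, by simp, by omega, by omega, by simp [h2]⟩
        · rintro ⟨s', hs1', hs2', hs3', hs4'⟩
          exact hns ⟨s' + 1, by simpa using hs1', by omega, by omega, by simpa using hs4'⟩

-- arithmetic form of the right-diagonal write set
theorem pvS_right (f c i j : Int) (hfi : f < i) (hi8 : i < 8) (hj : 0 ≤ j) (hj8 : j < 8) :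
    (∃ s : Nat, s < (PySem.List.pyRange (c + 1) 8 1).length ∧ f + 1 + s ≤ 7 ∧ i = f + 1 + s ∧
      (PySem.List.pyRange (c + 1) 8 1)[s]? = some j) ↔ j = c + (i - f) := by
  have hlen : (PySem.List.pyRange (c + 1) 8 1).length = (8 - (c + 1)).toNat :=
    PySem.List.length_pyRange_one _ _
  constructor
  · rintro ⟨s, h1, h2, h3, h4⟩
    rw [List.getElem?_eq_getElem h1] at h4
    have h5 : c + 1 + (s : Int) = j := by
      have h6 := PySem.List.getElem_pyRange_one (a := c + 1) (b := 8) (k := s) (h := h1)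
      rw [h6] at h4
      exact Option.some.inj h4
    omega
  · intro hjv
    have h1 : (i - f - 1).toNat < (PySem.List.pyRange (c + 1) 8 1).length := by
      rw [hlen]; omega
    refine ⟨(i - f - 1).toNat, h1, by omega, by omega, ?_⟩
    rw [List.getElem?_eq_getElem h1, PySem.List.getElem_pyRange_one]
    congr 1
    omega

-- arithmetic form of the left-diagonal write set
theorem pvS_left (f c i j : Int) (hfi : f < i) (hi8 : i < 8) (hj : 0 ≤ j) (hj8 : j < 8)
    (hc8 : c < 8) :
    (∃ s : Nat, s < (PySem.List.pyRange (c - 1) (-1) (-1)).length ∧ f + 1 + s ≤ 7 ∧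
      i = f + 1 + s ∧ (PySem.List.pyRange (c - 1) (-1) (-1))[s]? = some j) ↔ j = c - (i - f) := by
  have hr : PySem.List.pyRange (c - 1) (-1) (-1) =
      (List.range (c - 1 - (-1)).toNat).map (fun k : Nat => c - 1 - (k : Int)) :=
    PySem.List.pyRange_neg_one _ _
  have hlen : (PySem.List.pyRange (c - 1) (-1) (-1)).length = (c - 1 - (-1)).toNat := by
    rw [hr]; simp
  have hv : ∀ (s : Nat) (hs : s < (PySem.List.pyRange (c - 1) (-1) (-1)).length),
      (PySem.List.pyRange (c - 1) (-1) (-1))[s] = c - 1 - (s : Int) := by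
    intro s hs
    simp [hr]
  constructor
  · rintro ⟨s, h1, h2, h3, h4⟩
    rw [List.getElem?_eq_getElem h1, hv s h1] at h4
    have h5 : c - 1 - (s : Int) = j := Option.some.inj h4
    omega
  · intro hjv
    have h1 : (i - f - 1).toNat < (PySem.List.pyRange (c - 1) (-1) (-1)).length := by
      rw [hlen]; omega
    refine ⟨(i - f - 1).toNat, h1, by omega, by omega, ?_⟩
    rw [List.getElem?_eq_getElem h1, hv _ h1]
    congr 1
    omega

set_option maxHeartbeats 1000000 in
theorem pvMark_get (t : List (List Int)) (f c i j : Int) (ht : pvWF t)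
    (hf : 0 ≤ f) (hf7 : f < 7) (hc : 0 ≤ c) (hc8 : c < 8)
    (hfi : f < i) (hi8 : i < 8) (hj : 0 ≤ j) (hj8 : j < 8) :
    pvGetCell (pvMark t f c) i j =
      if j = c ∨ j = c + (i - f) ∨ j = c - (i - f) then 1 else pvGetCell t i j := by
  have hi0 : (0 : Int) ≤ i := by omega
  have hfne : ¬ f = 7 := by omega
  obtain ⟨hwf1, hget1⟩ := pvVert_get (PySem.List.pyRange (f + 1) 8 1) t c i j ht
    (fun x hx => by rw [PySem.List.mem_pyRange_one] at hx; omega) hc hc8 hi0 hi8 hj hj8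
  have hmemi : i ∈ PySem.List.pyRange (f + 1) 8 1 := by
    rw [PySem.List.mem_pyRange_one]; omega
  have hg1 : pvGetCell (pvVert t c (PySem.List.pyRange (f + 1) 8 1)) i j =
      if j = c then 1 else pvGetCell t i j := by
    rw [hget1]
    by_cases hjc : j = c
    · rw [if_pos ⟨hmemi, hjc⟩, if_pos hjc]
    · rw [if_neg (by tauto), if_neg hjc]
  by_cases hc7 : c = 7
  · have hc0 : ¬ c = 0 := by omega
    simp only [pvMark, if_neg hfne, if_pos hc7, if_neg hc0]
    obtain ⟨hwf3, hyes3, hno3⟩ := pvDiag_get (PySem.List.pyRange (c - 1) (-1) (-1)) _ (f + 1) i j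
      hwf1 (fun x hx => by rw [PySem.List.mem_pyRange_neg_one] at hx; omega)
      (by omega) (by omega) hi0 hi8 hj hj8
    have hS3 := pvS_left f c i j hfi hi8 hj hj8 hc8
    have hP2 : ¬ j = c + (i - f) := by omega
    by_cases hP3 : j = c - (i - f)
    · rw [hyes3 (hS3.mpr hP3), if_pos (Or.inr (Or.inr hP3))]
    · rw [hno3 (fun h => hP3 (hS3.mp h)), hg1]
      by_cases hjc : j = c
      · rw [if_pos hjc, if_pos (Or.inl hjc)]
      · rw [if_neg hjc, if_neg (by tauto)]
  · obtain ⟨hwf2, hyes2, hno2⟩ := pvDiag_get (PySem.List.pyRange (c + 1) 8 1) _ (f + 1) i j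
      hwf1 (fun x hx => by rw [PySem.List.mem_pyRange_one] at hx; omega)
      (by omega) (by omega) hi0 hi8 hj hj8
    have hS2 := pvS_right f c i j hfi hi8 hj hj8
    have hg2 : pvGetCell (pvDiag (pvVert t c (PySem.List.pyRange (f + 1) 8 1)) (f + 1)
        (PySem.List.pyRange (c + 1) 8 1)) i j =
        if j = c ∨ j = c + (i - f) then 1 else pvGetCell t i j := by
      by_cases hP2 : j = c + (i - f)
      · rw [hyes2 (hS2.mpr hP2), if_pos (Or.inr hP2)]
      · rw [hno2 (fun h => hP2 (hS2.mp h)), hg1]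
        by_cases hjc : j = c
        · rw [if_pos hjc, if_pos (Or.inl hjc)]
        · rw [if_neg hjc, if_neg (by tauto)]
    by_cases hc0 : c = 0
    · simp only [pvMark, if_neg hfne, if_neg hc7, if_pos hc0]
      rw [hg2]
      have hP3 : ¬ j = c - (i - f) := by omega
      by_cases h12 : j = c ∨ j = c + (i - f)
      · rw [if_pos h12, if_pos (by tauto)]
      · rw [if_neg h12, if_neg (by tauto)]
    · simp only [pvMark, if_neg hfne, if_neg hc7, if_neg hc0]
      obtain ⟨hwf3, hyes3, hno3⟩ := pvDiag_get (PySem.List.pyRange (c - 1) (-1) (-1)) _ (f + 1) i j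
        hwf2 (fun x hx => by rw [PySem.List.mem_pyRange_neg_one] at hx; omega)
        (by omega) (by omega) hi0 hi8 hj hj8
      have hS3 := pvS_left f c i j hfi hi8 hj hj8 hc8
      by_cases hP3 : j = c - (i - f)
      · rw [hyes3 (hS3.mpr hP3), if_pos (Or.inr (Or.inr hP3))]
      · rw [hno3 (fun h => hP3 (hS3.mp h)), hg2]
        by_cases h12 : j = c ∨ j = c + (i - f)
        · rw [if_pos h12, if_pos (by tauto)]
        · rw [if_neg h12, if_neg (by tauto)]

-- inner counting loop: can never reach 8 with too few columns left
theorem pvRowScan_short (r : List Int) (cols : List Int) (conta : Int)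
    (h : conta + cols.length < 8) : pvRowScan r cols conta = false := by
  induction cols generalizing conta with
  | nil => simp [pvRowScan]
  | cons x rest ih =>
    have hl : ((x :: rest).length : Int) = rest.length + 1 := by simp
    unfold pvRowScan
    split_ifs with h1 h2
    · omega
    · exact ih (conta + 1) (by omega)
    · exact ih conta (by omega)

-- with exactly the missing count of columns left, the scan is an 'all ones' test
theorem pvRowScan_all (r : List Int) (cols : List Int) (conta : Int)
    (h : conta + cols.length = 8) (hc : conta < 8) :
    pvRowScan r cols conta = cols.all (fun j => PySem.List.pyGetD r j 0 == 1) := by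
  induction cols generalizing conta with
  | nil => exfalso; simp at h; omega
  | cons x rest ih =>
    have hl : ((x :: rest).length : Int) = rest.length + 1 := by simp
    unfold pvRowScan
    split_ifs with h1 h2
    · have hrest : rest = [] := List.eq_nil_iff_length_eq_zero.mpr (by omega)
      simp [hrest, List.all_cons, h1]
    · rw [ih (conta + 1) (by omega) (by omega)]
      simp [List.all_cons, h1]
    · rw [pvRowScan_short r rest conta (by omega)]
      simp [List.all_cons, h1]

-- the two outer loops agree as soon as the per-row tests agree
theorem pvScan_congr (auxt t : List (List Int)) (f c : Int) (e : Bool) (l : List Int)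
    (h : ∀ i ∈ l, pvRowScan (PySem.List.pyGetD auxt i []) (PySem.List.pyRange 0 8 1) 0 =
      pvAltRow t f c i e) :
    pvScan auxt l = pvAltLoop t f c e l := by
  induction l with
  | nil => simp [pvScan, pvAltLoop]
  | cons x rest ih =>
    unfold pvScan pvAltLoop
    rw [h x (by simp), ih (fun y hy => h y (by simp [hy]))]

-- the marking loop: found / not found
theorem pvFind_mem (t : List (List Int)) (f c : Int) (l : List Int) (h : c ∈ l) :
    pvFind t f c l = pvMark t f c := by
  induction l with
  | nil => simp at h
  | cons x rest ih =>
    unfold pvFind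
    by_cases hx : x = c
    · subst hx; simp
    · rw [if_neg hx]
      refine ih ?_
      rcases List.mem_cons.mp h with h | h
      · exact absurd h.symm hx
      · exact h

theorem pvFind_not_mem (t : List (List Int)) (f c : Int) (l : List Int) (h : c ∉ l) :
    pvFind t f c l = t := by
  induction l with
  | nil => simp [pvFind]
  | cons x rest ih =>
    unfold pvFind
    rw [if_neg (by intro hx; exact h (by simp [hx]))]
    exact ih (by intro hx; exact h (by simp [hx]))

-- ===== VERDICT (by name: the statement is the Claim_ definition above) =====
theorem filaBloqueada_spec : Claim_equal_filaBloqueada := by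
  unfold Claim_equal_filaBloqueada Spec_filaBloqueada
  intro t f c _ hpre
  simp only [filaBloqueada, filaBloqueada_alt]
  rcases hpre with ⟨hlen, hrow, hf0, hf8, hnot⟩ | ⟨hf7, hcoff⟩
  case inr =>
    have hnil : PySem.List.pyRange (f + 1) 8 1 = [] := PySem.List.pyRange_one_eq_nil (by omega)
    rw [pvFind_not_mem t f c _ (by rw [PySem.List.mem_pyRange_one]; omega), hnil]
    simp [pvScan, pvAltLoop]
  by_cases hcb : 0 ≤ c ∧ c < 8
  · have hf7 : f < 7 := by
      rcases lt_or_eq_of_le (by omega : f ≤ 7) with h | h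
      · exact h
      · exact absurd ⟨h, hcb.1, hcb.2⟩ hnot
    have he : decide (0 ≤ c ∧ c < 8) = true := by simp [hcb.1, hcb.2]
    rw [pvFind_mem t f c _ (by rw [PySem.List.mem_pyRange_one]; omega), he]
    apply pvScan_congr
    intro i hi
    rw [PySem.List.mem_pyRange_one] at hi
    rw [pvRowScan_all _ _ 0 (by rw [PySem.List.length_pyRange_one]; simp) (by omega)]
    unfold pvAltRow
    have hcell : ∀ j ∈ PySem.List.pyRange 0 8 1,
        (PySem.List.pyGetD (PySem.List.pyGetD (pvMark t f c) i []) j 0 == 1) =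
        ((pvGetCell t i j == 1) ||
          (true && ((j == c) || (j == c + (i - f)) || (j == c - (i - f))))) := by
      intro j hj
      rw [PySem.List.mem_pyRange_one] at hj
      have hm := pvMark_get t f c i j ⟨hlen, hrow⟩ hf0 hf7 hcb.1 hcb.2 (by omega) (by omega)
        hj.1 hj.2
      show (pvGetCell (pvMark t f c) i j == 1) = _
      rw [hm]
      by_cases hblk : j = c ∨ j = c + (i - f) ∨ j = c - (i - f)
      · rw [if_pos hblk]
        have hb : ((j == c) || (j == c + (i - f)) || (j == c - (i - f))) = true := by
          rcases hblk with h | h | h <;> simp [h]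
        simp [hb]
      · have h1 : ¬ j = c := fun h => hblk (Or.inl h)
        have h2 : ¬ j = c + (i - f) := fun h => hblk (Or.inr (Or.inl h))
        have h3 : ¬ j = c - (i - f) := fun h => hblk (Or.inr (Or.inr h))
        have e1 : (j == c) = false := by simpa using h1
        have e2 : (j == c + (i - f)) = false := by simpa using h2
        have e3 : (j == c - (i - f)) = false := by simpa using h3
        rw [if_neg hblk]
        simp [e1, e2, e3]
    rw [Bool.eq_iff_iff, List.all_eq_true, List.all_eq_true]
    exact ⟨fun h j hj => by rw [← hcell j hj]; exact h j hj,
           fun h j hj => by rw [hcell j hj]; exact h j hj⟩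
  · have he : decide (0 ≤ c ∧ c < 8) = false := by simpa using hcb
    rw [pvFind_not_mem t f c _ (by rw [PySem.List.mem_pyRange_one]; omega), he]
    apply pvScan_congr
    intro i hi
    rw [PySem.List.mem_pyRange_one] at hi
    rw [pvRowScan_all _ _ 0 (by rw [PySem.List.length_pyRange_one]; simp) (by omega)]
    simp [pvAltRow, pvGetCell]
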